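-- pv_equiv track=rewrite | github.com/alexanderwedlund/isp-keyword-analyzer | src/ui/pages/analysis.py | get_next_keyword
-- ===== SOURCE A (Python) =====
-- def get_next_keyword(current_keyword, all_keywords, analyzed_keywords):
--     """Get the next keyword to analyze."""
--     if current_keyword is None:
--         for kw in all_keywords:
--             if kw not in analyzed_keywords:
--                 return kw
--         return all_keywords[0] if all_keywords else None
--
--     try:
--         current_index = all_keywords.index(current_keyword)
--     except ValueError:
--         return all_keywords[0] if all_keywords else None
--
--     for i in range(current_index + 1, len(all_keywords)):
--         if all_keywords[i] not in analyzed_keywords: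
--             return all_keywords[i]
--
--     for i in range(0, current_index):
--         if all_keywords[i] not in analyzed_keywords:
--             return all_keywords[i]
--
--     return all_keywords[(current_index + 1) % len(all_keywords)]
-- ===== SOURCE B (Python) =====
-- def get_next_keyword(current_keyword, all_keywords, analyzed_keywords):
--     """Get the next keyword to analyze: filter once, then pick by cyclic-distance arg-min."""
--     analyzed = set(analyzed_keywords)
--     candidates = [(j, kw) for j, kw in enumerate(all_keywords) if kw not in analyzed]
--     if current_keyword is None:
--         if candidates:
--             return candidates[0][1]
--         return all_keywords[0] if all_keywords else None
--     try:
--         i = all_keywords.index(current_keyword)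
--     except ValueError:
--         return all_keywords[0] if all_keywords else None
--     n = len(all_keywords)
--     best = None
--     for j, kw in candidates:
--         if j == i:
--             continue
--         d = (j - i - 1) % n
--         if best is None or d < best[0]:
--             best = (d, kw)
--     if best is not None:
--         return best[1]
--     return all_keywords[(i + 1) % n]
-- ===== Notes on version B (the rewrite author's own statement) =====
-- stated objective: alternative
-- what changed: A scans cyclically with two separate index loops (forward from current_index+1, then wraparound over 0..current_index-1) returning the first unanalyzed keyword; B instead builds the filtered candidate list (index, keyword) once by enumeration and selects the winner by an arg-min over the cyclic distance (j - i - 1) % n, with no cyclic scan at all; the not-found and None fallbacks are unchanged.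
import Mathlib
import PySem

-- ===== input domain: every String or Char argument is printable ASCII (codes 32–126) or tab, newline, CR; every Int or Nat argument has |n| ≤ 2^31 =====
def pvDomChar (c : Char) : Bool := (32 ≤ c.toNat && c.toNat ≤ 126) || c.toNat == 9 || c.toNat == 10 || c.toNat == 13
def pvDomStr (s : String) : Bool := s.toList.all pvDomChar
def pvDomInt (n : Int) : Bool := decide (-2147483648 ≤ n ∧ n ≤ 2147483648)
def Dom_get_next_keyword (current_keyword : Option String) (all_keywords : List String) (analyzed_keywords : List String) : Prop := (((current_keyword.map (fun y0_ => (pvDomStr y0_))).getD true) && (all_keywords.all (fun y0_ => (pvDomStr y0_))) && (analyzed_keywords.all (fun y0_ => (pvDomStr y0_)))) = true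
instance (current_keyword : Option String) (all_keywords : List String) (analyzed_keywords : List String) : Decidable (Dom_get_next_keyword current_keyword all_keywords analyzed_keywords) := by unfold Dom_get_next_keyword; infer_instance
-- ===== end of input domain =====

-- B filters the unanalyzed keywords once and selects by an arg-min over cyclic distance,
-- replacing A's two cyclic index scans (different algorithm, same cost class).

-- ===== PORT A =====
-- A's first loop: scan keywords from the start, return first one not analyzed
def pvA_firstNew (analyzed : List String) : List String → Option String
  | [] => none
  | kw :: rest => if !(analyzed.contains kw) then some kw else pvA_firstNew analyzed rest

-- A's 'for i in range(a, b): if all_keywords[i] not in analyzed: return all_keywords[i]'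
def pvA_idxLoop (all_kw analyzed : List String) : List Int → Option String
  | [] => none
  | i :: rest =>
      let kw := PySem.List.pyGetD all_kw i ""
      if !(analyzed.contains kw) then some kw else pvA_idxLoop all_kw analyzed rest

def get_next_keyword (current_keyword : Option String) (all_keywords : List String) (analyzed_keywords : List String) : Option String :=
  match current_keyword with
  | none =>
      match pvA_firstNew analyzed_keywords all_keywords with
      | some kw => some kw
      | none => if all_keywords.isEmpty then none else PySem.List.pyGet? all_keywords 0
  | some c =>
      match PySem.List.index? all_keywords c with
      | none => if all_keywords.isEmpty then none else PySem.List.pyGet? all_keywords 0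
      | some ci =>
          match pvA_idxLoop all_keywords analyzed_keywords
              (PySem.List.pyRange ((ci : Int) + 1) (all_keywords.length : Int) 1) with
          | some kw => some kw
          | none =>
              match pvA_idxLoop all_keywords analyzed_keywords
                  (PySem.List.pyRange 0 (ci : Int) 1) with
              | some kw => some kw
              | none =>
                  PySem.List.pyGet? all_keywords
                    (PySem.Int.mod ((ci : Int) + 1) (all_keywords.length : Int))

-- ===== PORT B =====
-- Source B: candidates = [(j, kw) for j, kw in enumerate(all_keywords) if kw not in analyzed]
def pvB_cands (analyzed : List String) (l : List String) : List (Int × String) :=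
  (PySem.List.enumerate l).filter (fun p => !(analyzed.contains p.2))

-- Source B's arg-min loop: best = None; for j, kw in candidates: skip j == i; d = (j-i-1) % n; keep smaller d
def pvB_best (i n : Int) : List (Int × String) → Option (Int × String) → Option (Int × String)
  | [], best => best
  | p :: rest, best =>
      if p.1 == i then pvB_best i n rest best
      else
        let d := PySem.Int.mod (p.1 - i - 1) n
        match best with
        | none => pvB_best i n rest (some (d, p.2))
        | some b => if d < b.1 then pvB_best i n rest (some (d, p.2)) else pvB_best i n rest best

def get_next_keyword_alt (current_keyword : Option String) (all_keywords : List String) (analyzed_keywords : List String) : Option String :=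
  let cands := pvB_cands analyzed_keywords all_keywords
  match current_keyword with
  | none =>
      match cands with
      | p :: _ => some p.2
      | [] => all_keywords.head?
  | some c =>
      match PySem.List.index? all_keywords c with
      | none => all_keywords.head?
      | some i =>
          match pvB_best (i : Int) (all_keywords.length : Int) cands none with
          | some b => some b.2
          | none =>
              PySem.List.pyGet? all_keywords
                (PySem.Int.mod ((i : Int) + 1) (all_keywords.length : Int))

-- ===== PRECONDITION & SPEC =====
def Spec_get_next_keyword (current_keyword : Option String) (all_keywords : List String) (analyzed_keywords : List String) (out : Option String) : Prop := out = get_next_keyword_alt current_keyword all_keywords analyzed_keywords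
instance (current_keyword : Option String) (all_keywords : List String) (analyzed_keywords : List String) (out : Option String) : Decidable (Spec_get_next_keyword current_keyword all_keywords analyzed_keywords out) := by unfold Spec_get_next_keyword; infer_instance

-- ===== CLAIM (what is proved, stated in full; the proofs are below) =====
def Claim_equal_get_next_keyword : Prop := ∀ (current_keyword : Option String) (all_keywords : List String) (analyzed_keywords : List String), Dom_get_next_keyword current_keyword all_keywords analyzed_keywords → Spec_get_next_keyword current_keyword all_keywords analyzed_keywords (get_next_keyword current_keyword all_keywords analyzed_keywords)

-- ===== LEMMAS AND PROOFS =====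

-- the test both programs apply to a keyword
def pvQ (an : List String) (kw : String) : Bool := !(an.contains kw)

-- cyclic successor index: j = (i + 1 + k) % n
def pvJ (i n k : Int) : Int := PySem.Int.mod (i + 1 + k) n

-- keyword at cyclic distance k past i
def pvF (all_kw : List String) (i n k : Int) : String :=
  PySem.List.pyGetD all_kw (pvJ i n k) ""

-- pvF with Nat distance (for indexing the rotated list)
def pvFN (all_kw : List String) (i : Nat) (k : Nat) : String :=
  pvF all_kw (i : Int) (all_kw.length : Int) (k : Int)

-- the d-values Source B's loop sees (candidates with j ≠ i, in list order)
def pvDs (i n : Int) (xs : List (Int × String)) : List Int :=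
  (xs.filter (fun p => !(p.1 == i))).map (fun p => PySem.Int.mod (p.1 - i - 1) n)

-- running optional minimum (combination order as in Source B's loop)
def pvMinF : List Int → Option Int → Option Int
  | [], b => b
  | d :: rest, b => pvMinF rest (some (match b with | none => d | some m => min m d))

theorem pvMod_small (a n : Int) (h0 : 0 ≤ a) (h : a < n) : PySem.Int.mod a n = a := by
  rw [PySem.Int.mod_eq_emod_of_pos (by omega)]
  exact Int.emod_eq_of_lt h0 h

theorem pvMod_wrap (a n : Int) (h0 : n ≤ a) (h : a < 2 * n) : PySem.Int.mod a n = a - n := by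
  rw [PySem.Int.mod_eq_emod_of_pos (by omega), ← Int.sub_emod_right a n]
  exact Int.emod_eq_of_lt (by omega) (by omega)

theorem pvMod_neg (a n : Int) (h0 : -n ≤ a) (h : a < 0) : PySem.Int.mod a n = a + n := by
  rw [PySem.Int.mod_eq_emod_of_pos (by omega), Int.emod_eq_add_self_emod]
  exact Int.emod_eq_of_lt (by omega) (by omega)

theorem pvA_firstNew_eq_find (an : List String) (l : List String) :
    pvA_firstNew an l = l.find? (pvQ an) := by
  induction l with
  | nil => rfl
  | cons kw rest ih =>
      by_cases h : kw ∈ an <;> simp [pvA_firstNew, List.find?, pvQ, h, ih]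

theorem pvA_idxLoop_eq_find (all_kw an : List String) :
    ∀ (k a : Nat), a + k ≤ all_kw.length →
      pvA_idxLoop all_kw an (PySem.List.pyRange (a : Int) ((a + k : Nat) : Int) 1) =
        ((all_kw.drop a).take k).find? (pvQ an) := by
  intro k
  induction k with
  | zero =>
      intro a _
      rw [PySem.List.pyRange_one_eq_nil (by omega)]
      simp [pvA_idxLoop]
  | succ k ih =>
      intro a ha
      have halen : a < all_kw.length := by omega
      rw [PySem.List.pyRange_one_cons (by exact_mod_cast (by omega : a < a + (k+1)))]
      have hdrop : all_kw.drop a = all_kw[a] :: all_kw.drop (a + 1) :=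
        List.drop_eq_getElem_cons halen
      rw [hdrop]
      simp only [pvA_idxLoop, List.take_succ_cons, List.find?]
      have hget : PySem.List.pyGetD all_kw (a : Int) "" = all_kw[a] := by
        rw [PySem.List.pyGetD_natCast]
        exact List.getD_eq_getElem _ _ halen
      rw [hget]
      have he : (a : Int) + 1 = ((a + 1 : Nat) : Int) := by push_cast; ring
      have he2 : ((a + (k + 1) : Nat) : Int) = (((a + 1) + k : Nat) : Int) := by push_cast; ring
      by_cases h : all_kw[a] ∈ an
      · rw [if_neg (by simp [h]), he, he2, ih (a + 1) (by omega)]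
        simp [pvQ, h]
      · rw [if_pos (by simp [h])]
        simp [pvQ, h]

theorem pvEmptyBranch (all_kw : List String) :
    (if all_kw.isEmpty then none else PySem.List.pyGet? all_kw 0) = all_kw.head? := by
  cases all_kw with
  | nil => rfl
  | cons x xs => simp [List.head?]

-- projecting the first surviving pair of the enumeration gives A's first-scan result
theorem pvCandsFind (an : List String) (l : List String) : ∀ s : Int,
    ((PySem.List.enumerate l s).find? (fun p => !(an.contains p.2))).map Prod.snd
      = l.find? (pvQ an) := by
  induction l with
  | nil => intro s; rfl
  | cons kw rest ih =>
      intro s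
      rw [PySem.List.enumerate_cons]
      by_cases h : kw ∈ an
      · simp only [List.find?, show (!(an.contains kw)) = false by simp [h]]
        simpa [pvQ, h, List.find?] using ih (s + 1)
      · simp [List.find?, pvQ, h]

theorem pvMinF_some (l : List Int) : ∀ m : Int, pvMinF l (some m) = some (l.foldl min m) := by
  induction l with
  | nil => intro m; rfl
  | cons d rest ih => intro m; simp [pvMinF, ih]

theorem pvMinF_none (l : List Int) : pvMinF l none = l.min? := by
  cases l with
  | nil => rfl
  | cons d rest => simp [pvMinF, pvMinF_some, List.min?]

-- d ↦ j inverse: pvJ undoes the cyclic distance of a valid index j ≠ i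
theorem pvJ_mod (i n j : Int)
    (hi : 0 ≤ i) (hin : i < n) (hj0 : 0 ≤ j) (hjn : j < n) (hne : j ≠ i) :
    pvJ i n (PySem.Int.mod (j - i - 1) n) = j := by
  unfold pvJ
  rcases lt_or_gt_of_ne hne with hlt | hgt
  · rw [pvMod_neg (j - i - 1) n (by omega) (by omega)]
    rw [pvMod_wrap _ n (by omega) (by omega)]
    ring
  · rw [pvMod_small (j - i - 1) n (by omega) (by omega)]
    rw [pvMod_small _ n (by omega) (by omega)]
    ring

-- arg-min loop invariant: the result is the minimum d, carried through d ↦ (d, pvF d)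
theorem pvBest_eq_minF (all_kw : List String) (i n : Int)
    (hi : 0 ≤ i) (hin : i < n) :
    ∀ (xs : List (Int × String)) (b : Option Int),
      (∀ p ∈ xs, 0 ≤ p.1 ∧ p.1 < n ∧ p.2 = PySem.List.pyGetD all_kw p.1 "") →
      pvB_best i n xs (b.map (fun d => (d, pvF all_kw i n d)))
        = (pvMinF (pvDs i n xs) b).map (fun d => (d, pvF all_kw i n d)) := by
  intro xs
  induction xs with
  | nil => intro b _; cases b <;> simp [pvB_best, pvDs, pvMinF]
  | cons p rest ih =>
      intro b hval
      obtain ⟨hp0, hpn, hpe⟩ := hval p (List.mem_cons_self)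
      have hrest : ∀ q ∈ rest, 0 ≤ q.1 ∧ q.1 < n ∧ q.2 = PySem.List.pyGetD all_kw q.1 "" :=
        fun q hq => hval q (List.mem_cons_of_mem _ hq)
      by_cases hpi : p.1 = i
      · have h1 : (p.1 == i) = true := by simp [hpi]
        rw [show pvDs i n (p :: rest) = pvDs i n rest from by
          simp [pvDs, hpi]]
        cases b with
        | none => simpa [pvB_best, h1] using ih none hrest
        | some m => simpa [pvB_best, h1] using ih (some m) hrest
      · have h1 : (p.1 == i) = false := by simp [hpi]
        have hd : pvF all_kw i n (PySem.Int.mod (p.1 - i - 1) n) = p.2 := by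
          unfold pvF
          rw [pvJ_mod i n p.1 hi hin hp0 hpn hpi, ← hpe]
        have hds : pvDs i n (p :: rest)
            = PySem.Int.mod (p.1 - i - 1) n :: pvDs i n rest := by
          simp [pvDs, h1]
        cases b with
        | none =>
            have hstep : pvB_best i n (p :: rest)
                  (Option.map (fun d => (d, pvF all_kw i n d)) none)
                = pvB_best i n rest (some (PySem.Int.mod (p.1 - i - 1) n, p.2)) := by
              simp [pvB_best, h1]
            rw [hstep,
              show (some (PySem.Int.mod (p.1 - i - 1) n, p.2))
                  = Option.map (fun d => (d, pvF all_kw i n d))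
                      (some (PySem.Int.mod (p.1 - i - 1) n)) from by simp [hd],
              ih _ hrest, hds]
            simp [pvMinF]
        | some m =>
            rw [hds]
            by_cases hcmp : PySem.Int.mod (p.1 - i - 1) n < m
            · have hstep : pvB_best i n (p :: rest)
                    (Option.map (fun d => (d, pvF all_kw i n d)) (some m))
                  = pvB_best i n rest (some (PySem.Int.mod (p.1 - i - 1) n, p.2)) := by
                simp [pvB_best, h1, hcmp]
              rw [hstep,
                show (some (PySem.Int.mod (p.1 - i - 1) n, p.2))
                    = Option.map (fun d => (d, pvF all_kw i n d))
                        (some (PySem.Int.mod (p.1 - i - 1) n)) from by simp [hd],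
                ih _ hrest]
              have : pvMinF (PySem.Int.mod (p.1 - i - 1) n :: pvDs i n rest) (some m)
                  = pvMinF (pvDs i n rest) (some (PySem.Int.mod (p.1 - i - 1) n)) := by
                simp only [pvMinF]
                rw [show min m (PySem.Int.mod (p.1 - i - 1) n)
                    = PySem.Int.mod (p.1 - i - 1) n by omega]
              rw [this]
            · have hstep : pvB_best i n (p :: rest)
                    (Option.map (fun d => (d, pvF all_kw i n d)) (some m))
                  = pvB_best i n rest
                      (Option.map (fun d => (d, pvF all_kw i n d)) (some m)) := by
                simp [pvB_best, h1, hcmp]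
              rw [hstep, ih _ hrest]
              have : pvMinF (PySem.Int.mod (p.1 - i - 1) n :: pvDs i n rest) (some m)
                  = pvMinF (pvDs i n rest) (some m) := by
                simp only [pvMinF]
                rw [show min m (PySem.Int.mod (p.1 - i - 1) n) = m by omega]
              rw [this]

-- validity of the candidate pairs
theorem pvCands_valid (an all_kw : List String) (n : Int) (hn : n = (all_kw.length : Int)) :
    ∀ p ∈ pvB_cands an all_kw, 0 ≤ p.1 ∧ p.1 < n ∧ p.2 = PySem.List.pyGetD all_kw p.1 "" := by
  intro p hp
  obtain ⟨hmem, -⟩ := List.mem_filter.mp hp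
  obtain ⟨k, hk, hpe⟩ := (PySem.List.mem_enumerate_iff _ _ _).mp hmem
  subst hpe
  refine ⟨by simp, by simp; omega, ?_⟩
  simp only [zero_add]
  rw [PySem.List.pyGetD_natCast, List.getD_eq_getElem _ _ hk]

-- membership in the d-list of the candidates
theorem pvDs_mem (all_kw an : List String) (i n : Int)
    (hi : 0 ≤ i) (hin : i < n) (hn : n = (all_kw.length : Int)) (k : Int) :
    k ∈ pvDs i n (pvB_cands an all_kw) ↔
      (0 ≤ k ∧ k < n - 1 ∧ pvQ an (pvF all_kw i n k) = true) := by
  have hnpos : (0:Int) < n := by omega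
  constructor
  · intro hk
    obtain ⟨p, hp, hdk⟩ := List.mem_map.mp hk
    obtain ⟨hp1, hp2⟩ := List.mem_filter.mp hp
    have hpi : p.1 ≠ i := by simpa using hp2
    obtain ⟨hp0, hpn, hpe⟩ := pvCands_valid an all_kw n hn p hp1
    obtain ⟨hq, -⟩ := List.mem_filter.mp hp1
    have hj : pvJ i n k = p.1 := by rw [← hdk]; exact pvJ_mod i n p.1 hi hin hp0 hpn hpi
    have hk0 : 0 ≤ k := by rw [← hdk]; exact PySem.Int.mod_nonneg _ hnpos
    have hkn : k < n := by rw [← hdk]; exact PySem.Int.mod_lt _ hnpos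
    have hkne : k ≠ n - 1 := by
      intro hcon
      apply hpi
      rw [← hj, hcon]
      unfold pvJ
      rw [show i + 1 + (n - 1) = i + n by ring, pvMod_wrap _ n (by omega) (by omega)]
      ring
    refine ⟨hk0, by omega, ?_⟩
    unfold pvF
    rw [hj, ← hpe]
    simpa [pvQ] using (List.mem_filter.mp hp1).2
  · rintro ⟨hk0, hkn, hq⟩
    set j : Int := pvJ i n k with hjdef
    have hj0 : 0 ≤ j := PySem.Int.mod_nonneg _ hnpos
    have hjn : j < n := PySem.Int.mod_lt _ hnpos
    have hji : j ≠ i := by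
      intro hcon
      have : PySem.Int.mod (i + 1 + k) n = i := hcon
      by_cases hc : i + 1 + k < n
      · rw [pvMod_small _ n (by omega) hc] at this; omega
      · rw [pvMod_wrap _ n (by omega) (by omega)] at this; omega
    have hdj : PySem.Int.mod (j - i - 1) n = k := by
      by_cases hc : i + 1 + k < n
      · have hjv : j = i + 1 + k := by rw [hjdef]; unfold pvJ; exact pvMod_small _ n (by omega) hc
        rw [hjv, show i + 1 + k - i - 1 = k by ring]
        exact pvMod_small _ n hk0 (by omega)
      · have hjv : j = i + 1 + k - n := by
          rw [hjdef]; unfold pvJ; exact pvMod_wrap _ n (by omega) (by omega)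
        rw [hjv, show i + 1 + k - n - i - 1 = k - n by ring]
        rw [pvMod_neg _ n (by omega) (by omega)]; ring
    apply List.mem_map.mpr
    refine ⟨(j, PySem.List.pyGetD all_kw j ""), ?_, by simpa using hdj⟩
    apply List.mem_filter.mpr
    refine ⟨?_, by simpa using hji⟩
    apply List.mem_filter.mpr
    constructor
    · apply (PySem.List.mem_enumerate_iff _ _ _).mpr
      refine ⟨j.toNat, by omega, ?_⟩
      have hjc : ((j.toNat : Nat) : Int) = j := by omega
      rw [Prod.ext_iff]
      refine ⟨by simpa using hjc.symm, ?_⟩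
      simp only
      conv_lhs => rw [← hjc]
      rw [PySem.List.pyGetD_natCast]
      exact List.getD_eq_getElem _ _ (by omega)
    · have : pvF all_kw i n k = PySem.List.pyGetD all_kw j "" := by unfold pvF; rw [← hjdef]
      simpa [pvQ, this] using hq

-- the rotated list A scans, re-indexed by cyclic distance
theorem pvRot_eq_map (all_kw : List String) (i : Nat) (hi : i < all_kw.length) :
    all_kw.drop (i + 1) ++ all_kw.take i
      = (List.range (all_kw.length - 1)).map (pvFN all_kw i) := by
  apply List.ext_getElem
  · simp; omega
  · intro k h1 h2
    have hk : k < all_kw.length - 1 := by simpa using h2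
    rw [List.getElem_map, List.getElem_range, List.getElem_append]
    split
    · next h' =>
        have hlt : i + 1 + k < all_kw.length := by simp at h'; omega
        rw [List.getElem_drop]
        have : pvFN all_kw i k
            = PySem.List.pyGetD all_kw ((i + 1 + k : Nat) : Int) "" := by
          unfold pvFN pvF pvJ
          rw [pvMod_small _ _ (by omega) (by exact_mod_cast hlt)]
          norm_num
        rw [this, PySem.List.pyGetD_natCast, List.getD_eq_getElem _ _ hlt]
    · next h' =>
        have hge : all_kw.length - (i + 1) ≤ k := by simpa using h'
        have hlen : (all_kw.drop (i+1)).length = all_kw.length - (i+1) := by simp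
        have htk : k - (all_kw.drop (i+1)).length < all_kw.length := by omega
        have hsm : k - (all_kw.length - (i+1)) < i := by omega
        have hF : pvFN all_kw i k
            = PySem.List.pyGetD all_kw
                ((k - (all_kw.drop (i+1)).length : Nat) : Int) "" := by
          unfold pvFN pvF pvJ
          rw [pvMod_wrap _ _ (by omega) (by omega)]
          congr 1
          simp only [List.length_drop]
          omega
        rw [List.getElem_take, hF, PySem.List.pyGetD_natCast,
          List.getD_eq_getElem _ _ htk]

-- first hit of the range scan at the unique minimal satisfying index
theorem pvFindRange (p : Nat → Bool) (m k0 : Nat) (hk : k0 < m) (hp : p k0 = true)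
    (hmin : ∀ l, l < k0 → p l = false) : (List.range m).find? p = some k0 := by
  apply List.find?_eq_some_iff_getElem.mpr
  refine ⟨hp, k0, by simpa using hk, by simp, ?_⟩
  intro j hj
  simp only [List.getElem_range]
  simp [hmin j hj]

-- ===== VERDICT (by name: the statement is the Claim_ definition above) =====
theorem get_next_keyword_spec : Claim_equal_get_next_keyword := by
  intro cw all_kw an _
  unfold Spec_get_next_keyword get_next_keyword get_next_keyword_alt
  cases cw with
  | none =>
      have hkey : ((pvB_cands an all_kw).head?).map Prod.snd = all_kw.find? (pvQ an) := by
        unfold pvB_cands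
        rw [List.head?_filter]
        exact pvCandsFind an all_kw 0
      rw [pvA_firstNew_eq_find, pvEmptyBranch]
      cases hc : pvB_cands an all_kw with
      | nil =>
          rw [hc] at hkey
          simp only [List.head?_nil, Option.map_none] at hkey
          simp only [← hkey]
      | cons p t =>
          rw [hc] at hkey
          simp only [List.head?_cons, Option.map_some] at hkey
          simp only [← hkey]
  | some c =>
      cases hidx : PySem.List.index? all_kw c with
      | none =>
          simp only [hidx]
          exact pvEmptyBranch all_kw
      | some ci =>
          simp only [hidx]
          obtain ⟨hci, -, -⟩ := PySem.List.getElem_of_index?_eq_some hidx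
          have hnpos : 0 < all_kw.length := by omega
          set n : Int := (all_kw.length : Int) with hndef
          have hi0 : (0:Int) ≤ (ci : Int) := by positivity
          have hin : (ci : Int) < n := by rw [hndef]; exact_mod_cast hci
          -- A side: two index loops = find? over the rotated list
          have h1 : pvA_idxLoop all_kw an (PySem.List.pyRange ((ci : Int) + 1) n 1)
              = (all_kw.drop (ci + 1)).find? (pvQ an) := by
            have he : ((ci : Int) + 1) = ((ci + 1 : Nat) : Int) := by push_cast; ring
            have he2 : n = (((ci + 1) + (all_kw.length - (ci + 1)) : Nat) : Int) := by
              rw [hndef]; push_cast; omega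
            rw [he, he2, pvA_idxLoop_eq_find all_kw an _ _ (by omega)]
            rw [List.take_of_length_le (by simp)]
          have h2 : pvA_idxLoop all_kw an (PySem.List.pyRange 0 (ci : Int) 1)
              = (all_kw.take ci).find? (pvQ an) := by
            have := pvA_idxLoop_eq_find all_kw an ci 0 (by omega)
            simpa using this
          rw [h1, h2]
          -- B side: arg-min = optional min of the d-list
          have hbest : pvB_best (ci : Int) n (pvB_cands an all_kw) none
              = ((pvDs (ci : Int) n (pvB_cands an all_kw)).min?).map
                  (fun d => (d, pvF all_kw (ci : Int) n d)) := by
            have := pvBest_eq_minF all_kw (ci : Int) n hi0 hin (pvB_cands an all_kw) none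
              (pvCands_valid an all_kw n hndef)
            simpa [pvMinF_none] using this
          rw [hbest]
          -- combine: find? over rotated list vs min of d-list
          have hrot := pvRot_eq_map all_kw ci hci
          have hcomb : (all_kw.drop (ci + 1) ++ all_kw.take ci).find? (pvQ an)
              = ((List.range (all_kw.length - 1)).find?
                  (fun k => pvQ an (pvFN all_kw ci k))).map (pvFN all_kw ci) := by
            rw [hrot, List.find?_map]
            rfl
          cases hm : (pvDs (ci : Int) n (pvB_cands an all_kw)).min? with
          | none =>
              have hds : pvDs (ci : Int) n (pvB_cands an all_kw) = [] :=
                List.min?_eq_none_iff.mp hm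
              have hnone : (all_kw.drop (ci + 1) ++ all_kw.take ci).find? (pvQ an) = none := by
                rw [hcomb]
                rw [List.find?_eq_none.mpr ?_]
                · rfl
                · intro x hx hq
                  have hxm : x < all_kw.length - 1 := List.mem_range.mp hx
                  have : (x : Int) ∈ pvDs (ci : Int) n (pvB_cands an all_kw) := by
                    apply (pvDs_mem all_kw an (ci : Int) n hi0 hin hndef (x : Int)).mpr
                    refine ⟨by positivity, by rw [hndef]; omega, hq⟩
                  rw [hds] at this
                  exact absurd this (List.not_mem_nil)
              rw [List.find?_append] at hnone
              rcases ho : (all_kw.drop (ci + 1)).find? (pvQ an) with _ | v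
              · rcases ho2 : (all_kw.take ci).find? (pvQ an) with _ | v2
                · simp
                · rw [ho, ho2] at hnone; simp at hnone
              · rw [ho] at hnone; simp at hnone
          | some d0 =>
              obtain ⟨hd0mem, hd0min⟩ := List.min?_eq_some_iff.mp hm
              obtain ⟨hd00, hd0n, hd0q⟩ :=
                (pvDs_mem all_kw an (ci : Int) n hi0 hin hndef d0).mp hd0mem
              have hfound : (all_kw.drop (ci + 1) ++ all_kw.take ci).find? (pvQ an)
                  = some (pvF all_kw (ci : Int) n d0) := by
                rw [hcomb]
                have hrange : (List.range (all_kw.length - 1)).find?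
                    (fun k => pvQ an (pvFN all_kw ci k)) = some d0.toNat := by
                  apply pvFindRange
                  · rw [hndef] at hd0n; omega
                  · show pvQ an (pvF all_kw (ci : Int) n ((d0.toNat : Nat) : Int)) = true
                    rw [show ((d0.toNat : Nat) : Int) = d0 by omega]; exact hd0q
                  · intro l hl
                    by_contra hcon
                    have hql : pvQ an (pvF all_kw (ci : Int) n (l : Int)) = true := by
                      revert hcon
                      show pvQ an (pvF all_kw (ci : Int) n ((l : Nat) : Int)) ≠ false → _
                      cases pvQ an (pvF all_kw (ci : Int) n (l : Int)) <;> simp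
                    have : (l : Int) ∈ pvDs (ci : Int) n (pvB_cands an all_kw) := by
                      apply (pvDs_mem all_kw an (ci : Int) n hi0 hin hndef (l : Int)).mpr
                      refine ⟨by positivity, by omega, hql⟩
                    have := hd0min _ this
                    omega
                rw [hrange]
                simp only [Option.map_some]
                show some (pvF all_kw (ci : Int) n ((d0.toNat : Nat) : Int)) = _
                rw [show ((d0.toNat : Nat) : Int) = d0 by omega]
              rw [List.find?_append] at hfound
              rcases ho : (all_kw.drop (ci + 1)).find? (pvQ an) with _ | v
              · rcases ho2 : (all_kw.take ci).find? (pvQ an) with _ | v2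
                · rw [ho, ho2] at hfound; simp at hfound
                · rw [ho, ho2] at hfound; simp at hfound; simp [hfound]
              · rw [ho] at hfound; simp at hfound; simp [hfound]
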